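-- pv_equiv track=rewrite | github.com/hhsieh14/LeetcodePractice | EncryptedWords.py | findEncryptedWord
-- ===== SOURCE A (Python) =====
-- def findEncryptedWord(s):
--   # Write your code here
--   mid = int((len(s)- 1)/2)
--   sub1 = s[:mid]
--   sub2 = s[mid + 1: ]
--   enc = ""
--   enc += s[mid]
--   if len(sub1) >= 3:
--     enc += findEncryptedWord(sub1)
--   else:
--     enc += sub1
--   if len(sub2)>= 3:
--     enc += findEncryptedWord(sub2)
--   else:
--     enc += sub2
--
--   return enc
-- ===== SOURCE B (Python) =====
-- def findEncryptedWord(s):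
--   stack = [(0, len(s))]
--   out = []
--   while stack:
--     lo, hi = stack.pop()
--     mid = lo + (hi - lo - 1) // 2
--     out.append(s[mid])
--     if hi > mid + 1:
--       stack.append((mid + 1, hi))
--     if mid > lo:
--       stack.append((lo, mid))
--   return ''.join(out)
-- ===== Notes on version B (the rewrite author's own statement) =====
-- stated objective: alternative
-- what changed: Replaces A's recursion on string slices (take the midpoint, then recurse on or append the two halves) by a single iterative loop over an explicit stack of half-open index ranges that emits midpoint characters in preorder, with one final join.
import Mathlib
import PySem

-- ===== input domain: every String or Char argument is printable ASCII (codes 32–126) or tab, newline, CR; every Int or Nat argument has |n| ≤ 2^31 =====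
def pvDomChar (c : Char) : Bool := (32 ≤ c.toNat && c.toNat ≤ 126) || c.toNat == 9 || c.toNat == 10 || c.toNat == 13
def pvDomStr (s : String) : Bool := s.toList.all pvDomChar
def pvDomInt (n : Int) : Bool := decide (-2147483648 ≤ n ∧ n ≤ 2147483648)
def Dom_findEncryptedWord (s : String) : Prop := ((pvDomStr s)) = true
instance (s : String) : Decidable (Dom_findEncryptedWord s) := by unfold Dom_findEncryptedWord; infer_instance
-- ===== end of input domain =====

-- B replaces A's midpoint recursion (with string slicing) by an iterative loop over an
-- explicit stack of half-open index ranges; same output, a different decomposition ("alternative").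

-- ===== PORT A =====
-- A's recursion, on the code-point list.  `int((len(s)-1)/2)` truncates toward zero → Int.tdiv.
-- `s[mid]` raises only on s = "" (excluded by Pre_); pyGet? is none exactly there, defaulted with ' '.
def pvEncA (l : List Char) : List Char :=
  let mid : Int := ((l.length : Int) - 1).tdiv 2
  let sub1 := PySem.List.slice l none (some mid)
  let sub2 := PySem.List.slice l (some (mid + 1)) none
  ((PySem.List.pyGet? l mid).getD ' ') ::
    ((if h1 : 3 ≤ sub1.length then pvEncA sub1 else sub1) ++
     (if h2 : 3 ≤ sub2.length then pvEncA sub2 else sub2))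
termination_by l.length
decreasing_by
  · -- sub1 = take mid, strictly shorter once nonempty
    have h1' : 3 ≤ (PySem.List.slice l none (some (((l.length : Int) - 1).tdiv 2))).length := h1
    clear h1
    cases l with
    | nil =>
      exfalso
      rw [show ((([] : List Char).length : Int) - 1).tdiv 2 = 0 from by decide,
        PySem.List.slice_to _ (le_refl 0)] at h1'
      simp at h1' 
    | cons a t =>
      have hlen : 1 ≤ (a :: t).length := by simp
      have hmid : (((a :: t).length : Int) - 1).tdiv 2 = ((((a :: t).length - 1) / 2 : Nat) : Int) := by
        have h : (((a :: t).length : Int) - 1) = ((((a :: t).length - 1 : Nat)) : Int) := by omega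
        rw [h]; rfl
      rw [hmid, PySem.List.slice_to _ (Int.natCast_nonneg _)] at h1' ⊢
      simp only [List.length_take, Int.toNat_natCast] at h1' ⊢
      simp only [List.length_cons] at h1' ⊢
      omega
  · have h2' : 3 ≤ (PySem.List.slice l (some (((l.length : Int) - 1).tdiv 2 + 1)) none).length := h2
    clear h2
    cases l with
    | nil =>
      exfalso
      rw [show ((([] : List Char).length : Int) - 1).tdiv 2 + 1 = ((1 : Nat) : Int) from by decide,
        PySem.List.slice_from _ (Int.natCast_nonneg _)] at h2'
      simp at h2' 
    | cons a t =>
      have hlen : 1 ≤ (a :: t).length := by simp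
      have hmid : (((a :: t).length : Int) - 1).tdiv 2 = ((((a :: t).length - 1) / 2 : Nat) : Int) := by
        have h : (((a :: t).length : Int) - 1) = ((((a :: t).length - 1 : Nat)) : Int) := by omega
        rw [h]; rfl
      have hmid1 : (((a :: t).length : Int) - 1).tdiv 2 + 1 = (((((a :: t).length - 1) / 2 + 1) : Nat) : Int) := by
        rw [hmid]; omega
      rw [hmid1, PySem.List.slice_from _ (Int.natCast_nonneg _)] at h2' ⊢
      simp only [List.length_drop, Int.toNat_natCast] at h2' ⊢
      simp only [List.length_cons] at h2' ⊢
      omega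

def findEncryptedWord (s : String) : String := String.ofList (pvEncA s.toList)

-- ===== PORT B =====
-- B's while-loop: pop a half-open range, emit its midpoint, push right then left child if
-- nonempty.  Fuel (length+1) only makes the loop total; it never runs out (each pop of a
-- nonempty range emits one distinct character, and only nonempty ranges are ever pushed).
def pvEncBLoop (cs : List Char) : Nat → List (Int × Int) → List Char → List Char
  | _, [], out => out
  | 0, _ :: _, out => out
  | Nat.succ fuel, (lo, hi) :: stack, out =>
      let mid : Int := lo + PySem.Int.floordiv (hi - lo - 1) 2
      let out' := out ++ [(PySem.List.pyGet? cs mid).getD ' ']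
      let st1 := if mid + 1 < hi then (mid + 1, hi) :: stack else stack
      let st2 := if lo < mid then (lo, mid) :: st1 else st1
      pvEncBLoop cs fuel st2 out'

def findEncryptedWord_alt (s : String) : String :=
  String.ofList (pvEncBLoop s.toList (s.toList.length + 1) [(0, (s.toList.length : Int))] [])

-- ===== PRECONDITION & SPEC =====
-- Pre_ excludes only the empty string, on which A (and B) raise IndexError.
def Pre_findEncryptedWord (s : String) : Prop := s ≠ ""
instance (s : String) : Decidable (Pre_findEncryptedWord s) := by unfold Pre_findEncryptedWord; infer_instance
def pvWitness_findEncryptedWord : String := "abcdef"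

def Spec_findEncryptedWord (s : String) (out : String) : Prop := out = findEncryptedWord_alt s
instance (s : String) (out : String) : Decidable (Spec_findEncryptedWord s out) := by unfold Spec_findEncryptedWord; infer_instance

-- ===== CLAIM (what is proved, stated in full; the proofs are below) =====
def Claim_equal_findEncryptedWord : Prop := ∀ (s : String), Dom_findEncryptedWord s → Pre_findEncryptedWord s → Spec_findEncryptedWord s (findEncryptedWord s)

-- ===== LEMMAS AND PROOFS =====

-- The contiguous segment cs[lo:hi] a stack entry denotes (proof-only helper).
def pvSeg (cs : List Char) (lo hi : Int) : List Char :=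
  (cs.drop lo.toNat).take (hi - lo).toNat

lemma pvEncA_small (l : List Char) (h1 : 1 ≤ l.length) (h : l.length ≤ 2) : pvEncA l = l := by
  cases l with
  | nil => simp at h1
  | cons a t =>
    cases t with
    | nil =>
      rw [pvEncA.eq_def]
      norm_num [PySem.List.slice, PySem.List.pyGet?, PySem.List.pyIdx?, PySem.List.clampIdx,
        show Int.tdiv 0 2 = 0 from rfl]
    | cons b u =>
      cases u with
      | nil =>
        rw [pvEncA.eq_def]
        norm_num [PySem.List.slice, PySem.List.pyGet?, PySem.List.pyIdx?, PySem.List.clampIdx,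
          show Int.tdiv 1 2 = 0 from rfl]
      | cons c v =>
        exfalso
        simp only [List.length_cons] at h
        omega

lemma pvEncA_unfold (l : List Char) (h : l ≠ []) :
    pvEncA l = l.getD ((l.length - 1) / 2) ' ' ::
      ((if 0 < (l.length - 1) / 2 then pvEncA (l.take ((l.length - 1) / 2)) else []) ++
       (if (l.length - 1) / 2 + 1 < l.length then pvEncA (l.drop ((l.length - 1) / 2 + 1)) else [])) := by
  have hlen : 1 ≤ l.length := by
    cases l with
    | nil => exact absurd rfl h
    | cons a t => simp
  set m := (l.length - 1) / 2 with hm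
  have hmlt : m < l.length := by omega
  rw [pvEncA]
  have hmid : ((l.length : Int) - 1).tdiv 2 = (m : Int) := by
    have : ((l.length : Int) - 1) = (((l.length - 1 : Nat)) : Int) := by omega
    rw [this]; rfl
  rw [hmid, PySem.List.slice_to l (by positivity)]
  have hfrom : PySem.List.slice l (some ((m : Int) + 1)) none = l.drop (m + 1) := by
    have : ((m : Int) + 1) = ((m + 1 : Nat) : Int) := by omega
    rw [this, PySem.List.slice_from l (by positivity)]
    simp
  rw [hfrom, PySem.List.pyGet?_natCast]
  have hget : l[(m : Nat)]? = some (l.getD m ' ') := by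
    rw [List.getD_eq_getElem l ' ' hmlt, List.getElem?_eq_getElem hmlt]
  rw [show ((m:Int).toNat = m) from by omega] at *
  rw [hget]
  simp only [Option.getD_some]
  congr 1
  congr 1
  · -- left child
    have hlt : (l.take m).length = m := by simp; omega
    by_cases h3 : 3 ≤ (l.take m).length
    · rw [dif_pos h3, if_pos (by omega)]
    · rw [dif_neg h3]
      by_cases h0 : 0 < m
      · rw [if_pos h0, pvEncA_small _ (by omega) (by omega)]
      · rw [if_neg h0]
        have : m = 0 := by omega
        simp [this]
  · have hld : (l.drop (m + 1)).length = l.length - (m + 1) := by simp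
    by_cases h3 : 3 ≤ (l.drop (m + 1)).length
    · rw [dif_pos h3, if_pos (by omega)]
    · rw [dif_neg h3]
      by_cases h0 : m + 1 < l.length
      · rw [if_pos h0, pvEncA_small _ (by omega) (by omega)]
      · rw [if_neg h0]
        have : l.drop (m + 1) = [] := by
          apply List.drop_eq_nil_of_le; omega
        simp [this]

-- The stack loop computes the concatenation of A's encodings of the segments on the stack,
-- provided every stack entry is a nonempty in-bounds range and the fuel covers the total size.
lemma pvEncBLoop_eq (cs : List Char) (fuel : Nat) :
    ∀ (st : List (Int × Int)) (out : List Char),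
      (∀ p ∈ st, 0 ≤ p.1 ∧ p.1 < p.2 ∧ p.2 ≤ (cs.length : Int)) →
      (st.map (fun p => (p.2 - p.1).toNat)).sum ≤ fuel →
      pvEncBLoop cs fuel st out = out ++ st.flatMap (fun p => pvEncA (pvSeg cs p.1 p.2)) := by
  induction fuel with
  | zero =>
    intro st out hv hf
    cases st with
    | nil => simp [pvEncBLoop]
    | cons p st =>
      exfalso
      have h1 := hv p (List.mem_cons_self ..)
      simp only [List.map_cons, List.sum_cons] at hf
      omega
  | succ fuel ih =>
    intro st out hv hf
    cases st with
    | nil => simp [pvEncBLoop]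
    | cons p st =>
      obtain ⟨lo, hi⟩ := p
      obtain ⟨hlo, hlt, hhi⟩ := hv (lo, hi) (List.mem_cons_self ..)
      simp only at hlo hlt hhi
      -- name the Nat versions of the bounds and the midpoint
      set L := lo.toNat with hL
      set sz := (hi - lo).toNat with hsz
      have hsz1 : 1 ≤ sz := by omega
      set m := (sz - 1) / 2 with hm
      have hloL : lo = (L : Int) := by omega
      have hhiH : hi = ((L + sz : Nat) : Int) := by omega
      have hLszn : L + sz ≤ cs.length := by omega
      have hmlt : m < sz := by omega
      -- the midpoint
      have hmid : lo + PySem.Int.floordiv (hi - lo - 1) 2 = ((L + m : Nat) : Int) := by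
        have h1 : hi - lo - 1 = ((sz - 1 : Nat) : Int) := by omega
        rw [h1, show (2 : Int) = ((2 : Nat) : Int) from rfl, PySem.Int.floordiv_natCast]
        omega
      rw [pvEncBLoop, hmid]
      -- the popped character
      have hidx : L + m < cs.length := by omega
      have hget : PySem.List.pyGet? cs ((L + m : Nat) : Int) = some (cs.getD (L + m) ' ') := by
        rw [PySem.List.pyGet?_natCast, List.getD_eq_getElem cs ' ' hidx,
          List.getElem?_eq_getElem hidx]
      rw [hget]
      -- the segment and its decomposition
      have hseg_len : (pvSeg cs lo hi).length = sz := by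
        simp only [pvSeg, List.length_take, List.length_drop]
        omega
      have hseg_ne : pvSeg cs lo hi ≠ [] := by
        intro hnil; rw [hnil] at hseg_len; simp at hseg_len; omega
      have hEA := pvEncA_unfold (pvSeg cs lo hi) hseg_ne
      rw [hseg_len] at hEA
      -- midpoint character of the segment
      have hmlt' : m < (pvSeg cs lo hi).length := by rw [hseg_len]; omega
      have hchar : (pvSeg cs lo hi).getD m ' ' = cs.getD (L + m) ' ' := by
        rw [List.getD_eq_getElem _ ' ' hmlt', List.getD_eq_getElem cs ' ' hidx]
        simp only [pvSeg, hloL]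
        rw [List.getElem_take, List.getElem_drop]
        simp
      -- children of the segment
      have htake : (pvSeg cs lo hi).take m = pvSeg cs lo ((L + m : Nat) : Int) := by
        simp only [pvSeg, hloL, List.take_take]
        congr 1
        omega
      have hdrop : (pvSeg cs lo hi).drop (m + 1) = pvSeg cs (((L + m : Nat) : Int) + 1) hi := by
        simp only [pvSeg, List.drop_take, List.drop_drop]
        have h1 : ((((L + m : Nat) : Int)) + 1).toNat = L + (m + 1) := by omega
        have h2 : (hi - (((L + m : Nat) : Int) + 1)).toNat = sz - (m + 1) := by omega
        rw [h1, h2]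
      rw [hchar, htake, hdrop] at hEA
      -- the new stack
      have hcondL' : (lo < (L : Int) + (m : Int)) ↔ 0 < m := by omega
      have hcondR' : ((L : Int) + (m : Int) + 1 < hi) ↔ m + 1 < sz := by omega
      -- apply the induction hypothesis to the new stack
      set st1 := if ((L + m : Nat) : Int) + 1 < hi then (((L + m : Nat) : Int) + 1, hi) :: st else st with hst1
      set st2 := if lo < ((L + m : Nat) : Int) then (lo, ((L + m : Nat) : Int)) :: st1 else st1 with hst2
      have hv' : ∀ p ∈ st2, 0 ≤ p.1 ∧ p.1 < p.2 ∧ p.2 ≤ (cs.length : Int) := by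
        intro p hp
        rw [hst2] at hp
        split_ifs at hp with hA
        · rcases List.mem_cons.mp hp with h | hp'
          · subst h; refine ⟨by omega, by omega, by omega⟩
          · rw [hst1] at hp'
            split_ifs at hp' with hB
            · rcases List.mem_cons.mp hp' with h | hp''
              · subst h; refine ⟨by omega, by omega, by omega⟩
              · exact hv _ (List.mem_cons_of_mem _ hp'')
            · exact hv _ (List.mem_cons_of_mem _ hp')
        · rw [hst1] at hp
          split_ifs at hp with hB
          · rcases List.mem_cons.mp hp with h | hp''
            · subst h; refine ⟨by omega, by omega, by omega⟩
            · exact hv _ (List.mem_cons_of_mem _ hp'')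
          · exact hv _ (List.mem_cons_of_mem _ hp)
      have hf' : (st2.map (fun p => (p.2 - p.1).toNat)).sum ≤ fuel := by
        simp only [List.map_cons, List.sum_cons] at hf
        rw [hst2, hst1]
        have hLm : ((((L + m : Nat) : Int)) - lo).toNat = m := by omega
        have hRm : (hi - (((L + m : Nat) : Int) + 1)).toNat = sz - (m + 1) := by omega
        split_ifs <;> (try simp only [List.map_cons, List.sum_cons, hLm, hRm]) <;> omega
      rw [ih st2 _ hv' hf']
      rw [List.flatMap_cons, hEA, hst2, hst1]
      by_cases h0 : 0 < m <;> by_cases h1c : m + 1 < sz <;>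
        simp [hcondL', hcondR', ← hm, h0, h1c, List.flatMap_cons, List.append_assoc]

-- ===== VERDICT (by name: the statement is the Claim_ definition above) =====
theorem findEncryptedWord_spec : Claim_equal_findEncryptedWord := by
  intro s _ hpre
  unfold Spec_findEncryptedWord findEncryptedWord findEncryptedWord_alt
  have hne : s.toList ≠ [] := by
    intro h
    exact hpre (String.toList_eq_nil_iff.mp h)
  have hlen : 1 ≤ s.toList.length := by
    cases h : s.toList with
    | nil => exact absurd h hne
    | cons a t => simp
  rw [pvEncBLoop_eq s.toList (s.toList.length + 1) [(0, (s.toList.length : Int))] []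
    (by
      intro p hp
      rw [List.mem_singleton] at hp
      subst hp
      refine ⟨le_refl 0, ?_, le_refl _⟩
      show (0 : Int) < (s.toList.length : Int)
      omega)
    (by simp)]
  congr 1
  simp only [List.flatMap_cons, List.flatMap_nil, List.append_nil, List.nil_append]
  congr 1
  simp [pvSeg]
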